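-- pv_equiv track=rewrite | github.com/V-Alexey/ECOWAS-Parsing | Attempt to parse.py | sift_words
-- ===== SOURCE A (Python) =====
-- def sift_words (test_d):          # Among all the mentioned words we take those that we are interested in
--     tag_list = ['TERROR', 'EXTREMIS', 'SECUR', 'ECONOM', 'TRAD', 'MARKET'] # Roots of the words
--     save_dict = {}
--     Dictionary = {'TERRORISM': 0, 'EXTREMISM': 0, 'SECURITY': 0, 'ECONOMIC': 0, 'TRADE': 0, 'MARKET': 0} # The words themselves
--     for i in tag_list:
--         for el in test_d.items():
--             if el[0].startswith(i): # Assign words instead of tags, so we can count them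
--                 save_dict[el[0]] = el[1]
--
--     for element in save_dict.items():   # Counting the number of mentions of the certain words
--         if element[0].startswith('TERROR'):
--             Dictionary['TERRORISM'] += element[1]
--         elif element[0].startswith('EXTREMIS'):
--             Dictionary['EXTREMISM'] += element[1]
--         elif element[0].startswith('SECUR'):
--             Dictionary['SECURITY'] += element[1]
--         elif element[0].startswith('ECONOM'):
--             Dictionary['ECONOMIC'] += element[1]
--         elif element[0].startswith('TRAD'):
--             Dictionary['TRADE'] += element[1]
--         elif element[0].startswith('MARKET'):
--             Dictionary['MARKET'] += element[1]
--     return(Dictionary)                   # Saving everything into the dictionary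
-- ===== SOURCE B (Python) =====
-- def sift_words(test_d):
--     # One pass over test_d: map each key's root prefix to its canonical word and add the value.
--     roots = {'TERROR': 'TERRORISM', 'EXTREMIS': 'EXTREMISM', 'SECUR': 'SECURITY',
--              'ECONOM': 'ECONOMIC', 'TRAD': 'TRADE', 'MARKET': 'MARKET'}
--     counts = {word: 0 for word in roots.values()}
--     for key, value in test_d.items():
--         for root, word in roots.items():
--             if key.startswith(root):
--                 counts[word] += value
--                 break
--     return counts
-- ===== Notes on version B (the rewrite author's own statement) =====
-- stated objective: simpler
-- what changed: A scans the dict once per root to build an intermediate save_dict and then re-scans save_dict with an elif chain; B makes a single pass over test_d.items(), mapping each key through a root->word table and adding its value directly, with no intermediate dict.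
import Mathlib
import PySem

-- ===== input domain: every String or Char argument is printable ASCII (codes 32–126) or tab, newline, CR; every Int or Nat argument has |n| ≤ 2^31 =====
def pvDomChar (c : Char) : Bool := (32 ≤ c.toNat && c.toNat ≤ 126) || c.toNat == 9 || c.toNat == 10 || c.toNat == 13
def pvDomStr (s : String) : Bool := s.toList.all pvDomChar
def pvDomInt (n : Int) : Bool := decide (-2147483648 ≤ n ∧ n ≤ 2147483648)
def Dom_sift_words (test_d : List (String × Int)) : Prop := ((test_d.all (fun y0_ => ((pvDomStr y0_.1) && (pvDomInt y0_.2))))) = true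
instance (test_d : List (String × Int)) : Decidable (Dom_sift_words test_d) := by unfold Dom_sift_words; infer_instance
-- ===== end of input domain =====

-- B replaces A's build-then-recount (one scan of the dict per root into an intermediate
-- save_dict, then an elif chain over save_dict) by a single pass over test_d with a
-- root→word table; same return value, objective: simpler.

-- ===== PORT A =====
def sift_words (test_d : List (String × Int)) : List (String × Int) :=
  let tag_list : List String := ["TERROR", "EXTREMIS", "SECUR", "ECONOM", "TRAD", "MARKET"]
  let save_dict : PySem.Dict String Int :=
    tag_list.foldl (fun sd i =>
      test_d.foldl (fun sd el =>
        if PySem.Str.startswith el.1 i then sd.insert el.1 el.2 else sd) sd)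
      PySem.Dict.empty
  let Dictionary : PySem.Dict String Int :=
    PySem.Dict.ofList [("TERRORISM", 0), ("EXTREMISM", 0), ("SECURITY", 0),
                       ("ECONOMIC", 0), ("TRADE", 0), ("MARKET", 0)]
  let Dictionary := save_dict.items.foldl (fun D element =>
      if PySem.Str.startswith element.1 "TERROR" then D.modify "TERRORISM" 0 (· + element.2)
      else if PySem.Str.startswith element.1 "EXTREMIS" then D.modify "EXTREMISM" 0 (· + element.2)
      else if PySem.Str.startswith element.1 "SECUR" then D.modify "SECURITY" 0 (· + element.2)
      else if PySem.Str.startswith element.1 "ECONOM" then D.modify "ECONOMIC" 0 (· + element.2)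
      else if PySem.Str.startswith element.1 "TRAD" then D.modify "TRADE" 0 (· + element.2)
      else if PySem.Str.startswith element.1 "MARKET" then D.modify "MARKET" 0 (· + element.2)
      else D) Dictionary
  Dictionary.items

-- ===== PORT B =====
-- inner `for root, word in roots.items(): if key.startswith(root): counts[word] += value; break`
def pvAddFirst (key : String) (value : Int) : List (String × String) → PySem.Dict String Int → PySem.Dict String Int
  | [], counts => counts
  | (root, word) :: rest, counts =>
      if PySem.Str.startswith key root then counts.modify word 0 (· + value)
      else pvAddFirst key value rest counts

def pvRoots : List (String × String) :=
  [("TERROR", "TERRORISM"), ("EXTREMIS", "EXTREMISM"), ("SECUR", "SECURITY"),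
   ("ECONOM", "ECONOMIC"), ("TRAD", "TRADE"), ("MARKET", "MARKET")]

def sift_words_alt (test_d : List (String × Int)) : List (String × Int) :=
  let counts : PySem.Dict String Int :=
    (pvRoots.map (·.2)).foldl (fun d word => d.insert word 0) PySem.Dict.empty
  let counts := test_d.foldl (fun counts kv => pvAddFirst kv.1 kv.2 pvRoots counts) counts
  counts.items

-- ===== PRECONDITION & SPEC =====
-- The argument encodes a Python dict, whose keys are unique; on list encodings with a
-- duplicated key (which no Python dict ever produces) the two ports disagree (A's
-- save_dict overwrites the earlier value, B adds every occurrence), so such lists are excluded.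
def Pre_sift_words (test_d : List (String × Int)) : Prop := (test_d.map Prod.fst).Nodup
instance (test_d : List (String × Int)) : Decidable (Pre_sift_words test_d) := by unfold Pre_sift_words; infer_instance
def pvWitness_sift_words : (List (String × Int)) := [("TERRORIST", 3), ("MARKETS", 2), ("xyz", 5)]

def Spec_sift_words (test_d : List (String × Int)) (out : List (String × Int)) : Prop := out = sift_words_alt test_d
instance (test_d : List (String × Int)) (out : List (String × Int)) : Decidable (Spec_sift_words test_d out) := by unfold Spec_sift_words; infer_instance

-- ===== CLAIM (what is proved, stated in full; the proofs are below) =====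
def Claim_equal_sift_words : Prop := ∀ (test_d : List (String × Int)), Dom_sift_words test_d → Pre_sift_words test_d → Spec_sift_words test_d (sift_words test_d)

-- ===== LEMMAS AND PROOFS =====

-- the six root prefixes, and the fact that none is a prefix of another
def pvTags : List String := ["TERROR", "EXTREMIS", "SECUR", "ECONOM", "TRAD", "MARKET"]

lemma pv_tags_prefix : ∀ p ∈ pvTags, ∀ q ∈ pvTags, p.toList <+: q.toList → p = q := by decide

-- does the entry's key start with root t?
def pvQ (t : String) (el : String × Int) : Bool := PySem.Str.startswith el.1 t

-- distinct roots never match the same key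
lemma pv_disj {p q : String} (hp : p ∈ pvTags) (hq : q ∈ pvTags) (hne : p ≠ q)
    (el : String × Int) (h : pvQ p el = true) : pvQ q el = false := by
  by_contra h'
  rw [Bool.not_eq_false] at h'
  unfold pvQ at h h'
  rw [PySem.Str.startswith_eq, PySem.Chars.startswith_iff] at h h'
  rcases List.prefix_or_prefix_of_prefix h h' with hpq | hqp
  · exact hne (pv_tags_prefix p hp q hq hpq)
  · exact hne (pv_tags_prefix q hq p hp hqp).symm

-- the six-counter dict with given values, in A's (= B's) key order
def pvToD (t : Int × Int × Int × Int × Int × Int) : PySem.Dict String Int :=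
  PySem.Dict.mk [("TERRORISM", t.1), ("EXTREMISM", t.2.1), ("SECURITY", t.2.2.1),
                 ("ECONOMIC", t.2.2.2.1), ("TRADE", t.2.2.2.2.1), ("MARKET", t.2.2.2.2.2)]

-- the elif-chain body both counting loops share
def pvBody (D : PySem.Dict String Int) (el : String × Int) : PySem.Dict String Int :=
  if pvQ "TERROR" el then D.modify "TERRORISM" 0 (· + el.2)
  else if pvQ "EXTREMIS" el then D.modify "EXTREMISM" 0 (· + el.2)
  else if pvQ "SECUR" el then D.modify "SECURITY" 0 (· + el.2)
  else if pvQ "ECONOM" el then D.modify "ECONOMIC" 0 (· + el.2)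
  else if pvQ "TRAD" el then D.modify "TRADE" 0 (· + el.2)
  else if pvQ "MARKET" el then D.modify "MARKET" 0 (· + el.2)
  else D

-- total value of the entries whose key starts with t
def pvS (t : String) (l : List (String × Int)) : Int := ((l.filter (pvQ t)).map (·.2)).sum

lemma pvS_nil (t : String) : pvS t [] = 0 := rfl

lemma pvS_cons (t : String) (el : String × Int) (l : List (String × Int)) :
    pvS t (el :: l) = (if pvQ t el then el.2 else 0) + pvS t l := by
  simp only [pvS, List.filter_cons]
  split_ifs <;> simp

lemma pv_fold (l : List (String × Int)) (a b c d e f : Int) :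
    l.foldl pvBody (pvToD (a, b, c, d, e, f)) =
      pvToD (a + pvS "TERROR" l, b + pvS "EXTREMIS" l, c + pvS "SECUR" l,
             d + pvS "ECONOM" l, e + pvS "TRAD" l, f + pvS "MARKET" l) := by
  induction l generalizing a b c d e f with
  | nil => simp [pvS_nil]
  | cons el l IH =>
    rw [List.foldl_cons]
    by_cases h1 : pvQ "TERROR" el
    · have hb : pvBody (pvToD (a, b, c, d, e, f)) el = pvToD (a + el.2, b, c, d, e, f) := by
        simp [pvBody, h1, pvToD, PySem.Dict.modify, PySem.Dict.get?, PySem.Dict.insert,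
              PySem.Dict.contains, PySem.Dict.getD]
      have g2 := pv_disj (p := "TERROR") (q := "EXTREMIS") (by decide) (by decide) (by decide) el h1
      have g3 := pv_disj (p := "TERROR") (q := "SECUR") (by decide) (by decide) (by decide) el h1
      have g4 := pv_disj (p := "TERROR") (q := "ECONOM") (by decide) (by decide) (by decide) el h1
      have g5 := pv_disj (p := "TERROR") (q := "TRAD") (by decide) (by decide) (by decide) el h1
      have g6 := pv_disj (p := "TERROR") (q := "MARKET") (by decide) (by decide) (by decide) el h1
      rw [hb, IH]
      simp [add_assoc, pvS_cons, h1, g2, g3, g4, g5, g6]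
    by_cases h2 : pvQ "EXTREMIS" el
    · have hb : pvBody (pvToD (a, b, c, d, e, f)) el = pvToD (a, b + el.2, c, d, e, f) := by
        simp [pvBody, h1, h2, pvToD, PySem.Dict.modify, PySem.Dict.get?, PySem.Dict.insert,
              PySem.Dict.contains, PySem.Dict.getD]
      have g3 := pv_disj (p := "EXTREMIS") (q := "SECUR") (by decide) (by decide) (by decide) el h2
      have g4 := pv_disj (p := "EXTREMIS") (q := "ECONOM") (by decide) (by decide) (by decide) el h2
      have g5 := pv_disj (p := "EXTREMIS") (q := "TRAD") (by decide) (by decide) (by decide) el h2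
      have g6 := pv_disj (p := "EXTREMIS") (q := "MARKET") (by decide) (by decide) (by decide) el h2
      rw [hb, IH]
      simp [add_assoc, pvS_cons, h1, h2, g3, g4, g5, g6]
    by_cases h3 : pvQ "SECUR" el
    · have hb : pvBody (pvToD (a, b, c, d, e, f)) el = pvToD (a, b, c + el.2, d, e, f) := by
        simp [pvBody, h1, h2, h3, pvToD, PySem.Dict.modify, PySem.Dict.get?, PySem.Dict.insert,
              PySem.Dict.contains, PySem.Dict.getD]
      have g4 := pv_disj (p := "SECUR") (q := "ECONOM") (by decide) (by decide) (by decide) el h3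
      have g5 := pv_disj (p := "SECUR") (q := "TRAD") (by decide) (by decide) (by decide) el h3
      have g6 := pv_disj (p := "SECUR") (q := "MARKET") (by decide) (by decide) (by decide) el h3
      rw [hb, IH]
      simp [add_assoc, pvS_cons, h1, h2, h3, g4, g5, g6]
    by_cases h4 : pvQ "ECONOM" el
    · have hb : pvBody (pvToD (a, b, c, d, e, f)) el = pvToD (a, b, c, d + el.2, e, f) := by
        simp [pvBody, h1, h2, h3, h4, pvToD, PySem.Dict.modify, PySem.Dict.get?, PySem.Dict.insert,
              PySem.Dict.contains, PySem.Dict.getD]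
      have g5 := pv_disj (p := "ECONOM") (q := "TRAD") (by decide) (by decide) (by decide) el h4
      have g6 := pv_disj (p := "ECONOM") (q := "MARKET") (by decide) (by decide) (by decide) el h4
      rw [hb, IH]
      simp [add_assoc, pvS_cons, h1, h2, h3, h4, g5, g6]
    by_cases h5 : pvQ "TRAD" el
    · have hb : pvBody (pvToD (a, b, c, d, e, f)) el = pvToD (a, b, c, d, e + el.2, f) := by
        simp [pvBody, h1, h2, h3, h4, h5, pvToD, PySem.Dict.modify, PySem.Dict.get?, PySem.Dict.insert,
              PySem.Dict.contains, PySem.Dict.getD]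
      have g6 := pv_disj (p := "TRAD") (q := "MARKET") (by decide) (by decide) (by decide) el h5
      rw [hb, IH]
      simp [add_assoc, pvS_cons, h1, h2, h3, h4, h5, g6]
    by_cases h6 : pvQ "MARKET" el
    · have hb : pvBody (pvToD (a, b, c, d, e, f)) el = pvToD (a, b, c, d, e, f + el.2) := by
        simp [pvBody, h1, h2, h3, h4, h5, h6, pvToD, PySem.Dict.modify, PySem.Dict.get?, PySem.Dict.insert,
              PySem.Dict.contains, PySem.Dict.getD]
      rw [hb, IH]
      simp [add_assoc, pvS_cons, h1, h2, h3, h4, h5, h6]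
    have hb : pvBody (pvToD (a, b, c, d, e, f)) el = pvToD (a, b, c, d, e, f) := by
      simp [pvBody, h1, h2, h3, h4, h5, h6]
    rw [hb, IH]
    simp [pvS_cons, h1, h2, h3, h4, h5, h6]

-- one tag pass of A's first loop = insert-fold over the filtered list
lemma pv_pass (test_d : List (String × Int)) (t : String) (sd : PySem.Dict String Int) :
    test_d.foldl (fun sd el =>
        if PySem.Str.startswith el.1 t then sd.insert el.1 el.2 else sd) sd
      = (test_d.filter (pvQ t)).foldl (fun sd el => sd.insert el.1 el.2) sd := by
  rw [List.foldl_filter]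
  rfl

-- the entries of save_dict, grouped by tag in A's insertion order
def pvL (td : List (String × Int)) : List (String × Int) :=
  td.filter (pvQ "TERROR") ++ td.filter (pvQ "EXTREMIS") ++ td.filter (pvQ "SECUR") ++
  td.filter (pvQ "ECONOM") ++ td.filter (pvQ "TRAD") ++ td.filter (pvQ "MARKET")

lemma pv_memfst {t k : String} {td : List (String × Int)}
    (h : k ∈ (td.filter (pvQ t)).map Prod.fst) : pvQ t (k, 0) = true := by
  obtain ⟨el, hmem, heq⟩ := List.mem_map.mp h
  have hq := (List.mem_filter.mp hmem).2
  simpa [pvQ, ← heq] using hq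

lemma pv_disjoint_seg {t u : String} (ht : t ∈ pvTags) (hu : u ∈ pvTags) (hne : t ≠ u)
    (td : List (String × Int)) :
    List.Disjoint ((td.filter (pvQ t)).map Prod.fst) ((td.filter (pvQ u)).map Prod.fst) := by
  intro k h1 h2
  have s1 := pv_memfst h1
  have s2 := pv_memfst h2
  rw [pv_disj ht hu hne (k, 0) s1] at s2
  exact absurd s2 (by simp)

lemma pv_seg_nodup {t : String} {td : List (String × Int)} (h : (td.map Prod.fst).Nodup) :
    ((td.filter (pvQ t)).map Prod.fst).Nodup :=
  h.sublist (List.Sublist.map Prod.fst (List.filter_sublist (l := td)))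

lemma pv_nodup {td : List (String × Int)} (h : (td.map Prod.fst).Nodup) :
    ((pvL td).map Prod.fst).Nodup := by
  unfold pvL
  simp only [List.map_append]
  refine List.Nodup.append (List.Nodup.append (List.Nodup.append (List.Nodup.append
    (List.Nodup.append (pv_seg_nodup h) (pv_seg_nodup h) ?_) (pv_seg_nodup h) ?_)
    (pv_seg_nodup h) ?_) (pv_seg_nodup h) ?_) (pv_seg_nodup h) ?_ <;>
  · try simp only [List.disjoint_append_left]
    first
      | exact pv_disjoint_seg (by decide) (by decide) (by decide) td
      | constructor <;>
        first
          | exact pv_disjoint_seg (by decide) (by decide) (by decide) td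
          | constructor <;>
            first
              | exact pv_disjoint_seg (by decide) (by decide) (by decide) td
              | constructor <;>
                first
                  | exact pv_disjoint_seg (by decide) (by decide) (by decide) td
                  | constructor <;> exact pv_disjoint_seg (by decide) (by decide) (by decide) td

-- save_dict (six conditional-insert passes) has items = pvL td, given unique keys
lemma pv_save_items {td : List (String × Int)} (h : (td.map Prod.fst).Nodup) :
    (List.foldl (fun sd i =>
        td.foldl (fun sd el =>
          if PySem.Str.startswith el.1 i then sd.insert el.1 el.2 else sd) sd)
      PySem.Dict.empty ["TERROR", "EXTREMIS", "SECUR", "ECONOM", "TRAD", "MARKET"]).items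
      = pvL td := by
  simp only [List.foldl_cons, List.foldl_nil]
  rw [pv_pass, pv_pass, pv_pass, pv_pass, pv_pass, pv_pass]
  rw [← List.foldl_append, ← List.foldl_append, ← List.foldl_append, ← List.foldl_append,
      ← List.foldl_append]
  have := PySem.Dict.items_foldl_insert_fresh (pvL td) Prod.fst Prod.snd PySem.Dict.empty
    (by intro a _; simp) (pv_nodup h)
  simpa [pvL] using this

lemma pv_filter_self (p : String × Int → Bool) (l : List (String × Int)) :
    (l.filter p).filter p = l.filter p := by
  rw [List.filter_filter]
  simp

lemma pv_filter_other {t u : String} (ht : t ∈ pvTags) (hu : u ∈ pvTags) (hne : t ≠ u)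
    (td : List (String × Int)) : (td.filter (pvQ u)).filter (pvQ t) = [] := by
  rw [List.filter_eq_nil_iff]
  intro a ha
  have hu' : pvQ u a = true := (List.mem_filter.mp ha).2
  simp [pv_disj hu ht hne.symm a hu']

lemma pv_ff (t u : String) (ht : t ∈ pvTags) (hu : u ∈ pvTags) (td : List (String × Int)) :
    (td.filter (pvQ u)).filter (pvQ t) = if t = u then td.filter (pvQ t) else [] := by
  split_ifs with h
  · rw [h, pv_filter_self]
  · exact pv_filter_other ht hu h td

lemma pv_sum_pvL (t : String) (ht : t ∈ pvTags) (td : List (String × Int)) :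
    pvS t (pvL td) = pvS t td := by
  unfold pvS
  fin_cases ht
  · simp only [pvL, List.filter_append, List.map_append, List.sum_append]
    rw [pv_ff "TERROR" "TERROR" (by decide) (by decide) td, pv_ff "TERROR" "EXTREMIS" (by decide) (by decide) td, pv_ff "TERROR" "SECUR" (by decide) (by decide) td, pv_ff "TERROR" "ECONOM" (by decide) (by decide) td, pv_ff "TERROR" "TRAD" (by decide) (by decide) td, pv_ff "TERROR" "MARKET" (by decide) (by decide) td]
    simp
  · simp only [pvL, List.filter_append, List.map_append, List.sum_append]
    rw [pv_ff "EXTREMIS" "TERROR" (by decide) (by decide) td, pv_ff "EXTREMIS" "EXTREMIS" (by decide) (by decide) td, pv_ff "EXTREMIS" "SECUR" (by decide) (by decide) td, pv_ff "EXTREMIS" "ECONOM" (by decide) (by decide) td, pv_ff "EXTREMIS" "TRAD" (by decide) (by decide) td, pv_ff "EXTREMIS" "MARKET" (by decide) (by decide) td]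
    simp
  · simp only [pvL, List.filter_append, List.map_append, List.sum_append]
    rw [pv_ff "SECUR" "TERROR" (by decide) (by decide) td, pv_ff "SECUR" "EXTREMIS" (by decide) (by decide) td, pv_ff "SECUR" "SECUR" (by decide) (by decide) td, pv_ff "SECUR" "ECONOM" (by decide) (by decide) td, pv_ff "SECUR" "TRAD" (by decide) (by decide) td, pv_ff "SECUR" "MARKET" (by decide) (by decide) td]
    simp
  · simp only [pvL, List.filter_append, List.map_append, List.sum_append]
    rw [pv_ff "ECONOM" "TERROR" (by decide) (by decide) td, pv_ff "ECONOM" "EXTREMIS" (by decide) (by decide) td, pv_ff "ECONOM" "SECUR" (by decide) (by decide) td, pv_ff "ECONOM" "ECONOM" (by decide) (by decide) td, pv_ff "ECONOM" "TRAD" (by decide) (by decide) td, pv_ff "ECONOM" "MARKET" (by decide) (by decide) td]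
    simp
  · simp only [pvL, List.filter_append, List.map_append, List.sum_append]
    rw [pv_ff "TRAD" "TERROR" (by decide) (by decide) td, pv_ff "TRAD" "EXTREMIS" (by decide) (by decide) td, pv_ff "TRAD" "SECUR" (by decide) (by decide) td, pv_ff "TRAD" "ECONOM" (by decide) (by decide) td, pv_ff "TRAD" "TRAD" (by decide) (by decide) td, pv_ff "TRAD" "MARKET" (by decide) (by decide) td]
    simp
  · simp only [pvL, List.filter_append, List.map_append, List.sum_append]
    rw [pv_ff "MARKET" "TERROR" (by decide) (by decide) td, pv_ff "MARKET" "EXTREMIS" (by decide) (by decide) td, pv_ff "MARKET" "SECUR" (by decide) (by decide) td, pv_ff "MARKET" "ECONOM" (by decide) (by decide) td, pv_ff "MARKET" "TRAD" (by decide) (by decide) td, pv_ff "MARKET" "MARKET" (by decide) (by decide) td]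
    simp

-- the shared counting loop, from the all-zero dict
lemma pv_count_fold (l : List (String × Int)) :
    l.foldl (fun D element =>
      if PySem.Str.startswith element.1 "TERROR" then D.modify "TERRORISM" 0 (· + element.2)
      else if PySem.Str.startswith element.1 "EXTREMIS" then D.modify "EXTREMISM" 0 (· + element.2)
      else if PySem.Str.startswith element.1 "SECUR" then D.modify "SECURITY" 0 (· + element.2)
      else if PySem.Str.startswith element.1 "ECONOM" then D.modify "ECONOMIC" 0 (· + element.2)
      else if PySem.Str.startswith element.1 "TRAD" then D.modify "TRADE" 0 (· + element.2)
      else if PySem.Str.startswith element.1 "MARKET" then D.modify "MARKET" 0 (· + element.2)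
      else D)
      (PySem.Dict.ofList [("TERRORISM", 0), ("EXTREMISM", 0), ("SECURITY", 0),
                          ("ECONOMIC", 0), ("TRADE", 0), ("MARKET", 0)])
      = pvToD (pvS "TERROR" l, pvS "EXTREMIS" l, pvS "SECUR" l,
               pvS "ECONOM" l, pvS "TRAD" l, pvS "MARKET" l) := by
  have h0 : PySem.Dict.ofList [(("TERRORISM" : String), (0 : Int)), ("EXTREMISM", 0), ("SECURITY", 0),
      ("ECONOMIC", 0), ("TRADE", 0), ("MARKET", 0)] = pvToD (0, 0, 0, 0, 0, 0) := by decide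
  have hf : (fun (D : PySem.Dict String Int) (element : String × Int) =>
      if PySem.Str.startswith element.1 "TERROR" then D.modify "TERRORISM" 0 (· + element.2)
      else if PySem.Str.startswith element.1 "EXTREMIS" then D.modify "EXTREMISM" 0 (· + element.2)
      else if PySem.Str.startswith element.1 "SECUR" then D.modify "SECURITY" 0 (· + element.2)
      else if PySem.Str.startswith element.1 "ECONOM" then D.modify "ECONOMIC" 0 (· + element.2)
      else if PySem.Str.startswith element.1 "TRAD" then D.modify "TRADE" 0 (· + element.2)
      else if PySem.Str.startswith element.1 "MARKET" then D.modify "MARKET" 0 (· + element.2)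
      else D) = pvBody := rfl
  rw [h0, hf, pv_fold]
  simp

-- B's single pass, from its all-zero dict, computes the same tuple of sums
lemma pv_alt_fold (l : List (String × Int)) :
    l.foldl (fun counts kv => pvAddFirst kv.1 kv.2 pvRoots counts)
      ((pvRoots.map (·.2)).foldl (fun d word => d.insert word 0) PySem.Dict.empty)
      = pvToD (pvS "TERROR" l, pvS "EXTREMIS" l, pvS "SECUR" l,
               pvS "ECONOM" l, pvS "TRAD" l, pvS "MARKET" l) := by
  have h0 : ((pvRoots.map (·.2)).foldl (fun d word => d.insert word 0) PySem.Dict.empty)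
      = pvToD (0, 0, 0, 0, 0, 0) := by decide
  have hf : (fun (counts : PySem.Dict String Int) (kv : String × Int) =>
      pvAddFirst kv.1 kv.2 pvRoots counts) = pvBody := by
    funext counts kv
    show pvAddFirst kv.1 kv.2 pvRoots counts = _
    rw [pvRoots, pvAddFirst, pvAddFirst, pvAddFirst, pvAddFirst, pvAddFirst, pvAddFirst, pvAddFirst]
    rfl
  rw [h0, hf, pv_fold]
  simp

-- ===== VERDICT (by name: the statement is the Claim_ definition above) =====
theorem sift_words_spec : Claim_equal_sift_words := by
  intro test_d _ hpre
  unfold Spec_sift_words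
  show sift_words test_d = sift_words_alt test_d
  simp only [sift_words, sift_words_alt]
  rw [pv_save_items hpre, pv_count_fold, pv_alt_fold]
  have e1 := pv_sum_pvL "TERROR" (by decide) test_d
  have e2 := pv_sum_pvL "EXTREMIS" (by decide) test_d
  have e3 := pv_sum_pvL "SECUR" (by decide) test_d
  have e4 := pv_sum_pvL "ECONOM" (by decide) test_d
  have e5 := pv_sum_pvL "TRAD" (by decide) test_d
  have e6 := pv_sum_pvL "MARKET" (by decide) test_d
  rw [e1, e2, e3, e4, e5, e6]
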